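-- pv_equiv track=rewrite | github.com/taeukkk/baekjoon | week21/balloon.py | solution
-- ===== SOURCE A (Python) =====
-- def solution(a):
--     answer = 2
--     L = len(a)
--     min_left,min_right = [10**9+1]*L,[10**9+1]*L
--     min_left[0] = a[0]
--     min_right[-1] = a[-1]
--     for i in range(1,L):
--         min_left[i] = min(min_left[i-1],a[i])
--         min_right[L-1-i] = min(min_right[L-i],a[L-1-i])
--     for i in range(1,L-1):
--         if min_left[i-1]<a[i] and min_right[i+1]<a[i]:
--             continue
--         answer+=1
--     return answer
-- ===== SOURCE B (Python) =====
-- def solution(a):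
--     L = len(a)
--     if L <= 2:
--         return 2
--     m = min(a)
--     P = S = B = 0
--     run = a[0]
--     for i in range(1, L - 1):
--         if a[i] <= run:
--             P += 1
--         if a[i] == m:
--             B += 1
--         run = min(run, a[i])
--     run = a[-1]
--     for i in range(L - 2, 0, -1):
--         if a[i] <= run:
--             S += 1
--         run = min(run, a[i])
--     return 2 + P + S - B
-- ===== Notes on version B (the rewrite author's own statement) =====
-- stated objective: alternative
-- what changed: Replaces A's two scratch min-arrays and separate counting pass by an array-free inclusion-exclusion count: one forward pass counting weak prefix minima (and global-minimum ties), one backward pass counting weak suffix minima, returning 2 + P + S - B.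
-- crash fix: On the empty list A raises IndexError (a[0]); B returns 2. — e.g. on solution([]): A raises IndexError, B returns 2
import Mathlib
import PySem

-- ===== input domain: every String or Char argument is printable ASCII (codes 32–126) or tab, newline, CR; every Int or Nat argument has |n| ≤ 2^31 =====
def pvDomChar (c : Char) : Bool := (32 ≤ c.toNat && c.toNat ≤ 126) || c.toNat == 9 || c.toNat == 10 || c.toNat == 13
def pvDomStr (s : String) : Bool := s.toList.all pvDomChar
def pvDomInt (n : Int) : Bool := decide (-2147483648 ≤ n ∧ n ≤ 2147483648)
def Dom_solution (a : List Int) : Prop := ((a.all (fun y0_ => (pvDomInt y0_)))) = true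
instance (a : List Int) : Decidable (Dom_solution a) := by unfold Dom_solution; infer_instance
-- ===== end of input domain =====

-- B replaces A's two scratch min-arrays by an array-free inclusion-exclusion count 2 + P + S - B; equivalence is about the return value (A mutates nothing).

-- ===== PORT A =====
-- one iteration of A's first loop: min_left[i] and min_right[L-1-i] assignments
def stepA (a : List Int) (L : Nat) (p : List Int × List Int) (i : Int) : List Int × List Int :=
  let j := i.toNat
  ((p.1).set j (min ((p.1).getD (j-1) 0) (a.getD j 0)),
   (p.2).set (L-1-j) (min ((p.2).getD (L-j) 0) (a.getD (L-1-j) 0)))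

def solution (a : List Int) : Int :=
  let L := a.length
  let st := (PySem.List.pyRange 1 (L:Int) 1).foldl (stepA a L)
    ((List.replicate L ((10:Int)^9+1)).set 0 (a.getD 0 0),
     (List.replicate L ((10:Int)^9+1)).set (L-1) (a.getD (L-1) 0))
  (PySem.List.pyRange 1 ((L:Int)-1) 1).foldl
    (fun answer i =>
      if st.1.getD (i.toNat-1) 0 < a.getD i.toNat 0 ∧ st.2.getD (i.toNat+1) 0 < a.getD i.toNat 0
      then answer else answer + 1) 2

-- ===== PORT B =====
-- one iteration of B's forward loop: state (P, B, run)
def stepB1 (a : List Int) (m : Int) (s : Int × Int × Int) (i : Int) : Int × Int × Int :=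
  let x := a.getD i.toNat 0
  ((if x ≤ s.2.2 then s.1 + 1 else s.1), (if x = m then s.2.1 + 1 else s.2.1), min s.2.2 x)

-- one iteration of B's backward loop: state (S, run)
def stepB2 (a : List Int) (s : Int × Int) (i : Int) : Int × Int :=
  let x := a.getD i.toNat 0
  ((if x ≤ s.2 then s.1 + 1 else s.1), min s.2 x)

def solution_alt (a : List Int) : Int :=
  let L := a.length
  if L ≤ 2 then 2
  else
    let m := (PySem.List.min? a (fun x => x)).getD 0
    let s1 := (PySem.List.pyRange 1 ((L:Int)-1) 1).foldl (stepB1 a m) (0, 0, a.getD 0 0)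
    let s2 := (PySem.List.pyRange ((L:Int)-2) 0 (-1)).foldl (stepB2 a) (0, a.getD (L-1) 0)
    2 + s1.1 + s2.1 - s1.2.1

-- ===== PRECONDITION & SPEC =====
-- Pre_ excludes only the empty list, on which A raises IndexError (a[0]).
def Pre_solution (a : List Int) : Prop := a ≠ []
instance (a : List Int) : Decidable (Pre_solution a) := by unfold Pre_solution; infer_instance
def pvWitness_solution : List Int := ([3, 1, 2, 1, 4])

-- On the empty list A raises IndexError; B returns 2 (as for every list of length ≤ 2).
def Raises_solution (a : List Int) : Prop := a = []
instance (a : List Int) : Decidable (Raises_solution a) := by unfold Raises_solution; infer_instance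
def pvRaiseWitness_solution : List Int := ([])
def pvRaiseWitnessOut_solution : Int := 2

def Spec_solution (a : List Int) (out : Int) : Prop := out = solution_alt a
instance (a : List Int) (out : Int) : Decidable (Spec_solution a out) := by unfold Spec_solution; infer_instance

-- ===== CLAIM (what is proved, stated in full; the proofs are below) =====
def Claim_equal_solution : Prop := ∀ (a : List Int), Dom_solution a → Pre_solution a → Spec_solution a (solution a)
def Claim_raises_solution : Prop := (∀ (a : List Int), Dom_solution a → Raises_solution a → ¬ Pre_solution a) ∧ (Dom_solution (pvRaiseWitness_solution) ∧ Raises_solution (pvRaiseWitness_solution) ∧ solution_alt (pvRaiseWitness_solution) = pvRaiseWitnessOut_solution)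

-- ===== LEMMAS AND PROOFS =====

-- running prefix minimum: pm a k = min a[0..k]
def pm (a : List Int) : Nat → Int
  | 0 => a.getD 0 0
  | k+1 => min (pm a k) (a.getD (k+1) 0)

-- running suffix minimum from the right: sm a k = min a[L-1-k..L-1]
def sm (a : List Int) : Nat → Int
  | 0 => a.getD (a.length-1) 0
  | k+1 => min (sm a k) (a.getD (a.length-1-(k+1)) 0)

lemma getD_mem (a : List Int) (j : Nat) (h : j < a.length) : a.getD j 0 ∈ a := by
  rw [List.getD_eq_getElem a 0 h]; exact List.getElem_mem h

lemma pm_le (a : List Int) (k t : Nat) (ht : t ≤ k) : pm a k ≤ a.getD t 0 := by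
  induction k with
  | zero => simp_all [pm]
  | succ k ih =>
    rcases Nat.lt_or_ge t (k+1) with h | h
    · exact le_trans (min_le_left _ _) (ih (by omega))
    · have : t = k+1 := by omega
      subst this; exact min_le_right _ _

lemma pm_mem (a : List Int) (k : Nat) (h : k < a.length) : pm a k ∈ a := by
  induction k with
  | zero => exact getD_mem a 0 (by omega)
  | succ k ih =>
    show min (pm a k) (a.getD (k+1) 0) ∈ a
    rcases le_total (pm a k) (a.getD (k+1) 0) with h' | h'
    · rw [min_eq_left h']; exact ih (by omega)
    · rw [min_eq_right h']; exact getD_mem a (k+1) h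

lemma sm_le (a : List Int) (k t : Nat) (h1 : a.length - 1 - k ≤ t) (h2 : t < a.length) :
    sm a k ≤ a.getD t 0 := by
  induction k with
  | zero =>
    have : t = a.length - 1 := by omega
    subst this; simp [sm]
  | succ k ih =>
    rcases Nat.lt_or_ge t (a.length - 1 - k) with h | h
    · have : t = a.length - 1 - (k+1) := by omega
      subst this; exact min_le_right _ _
    · exact le_trans (min_le_left _ _) (ih h)

lemma sm_mem (a : List Int) (k : Nat) (h : k < a.length) : sm a k ∈ a := by
  induction k with
  | zero => exact getD_mem a (a.length - 1) (by omega)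
  | succ k ih =>
    show min (sm a k) (a.getD (a.length-1-(k+1)) 0) ∈ a
    rcases le_total (sm a k) (a.getD (a.length-1-(k+1)) 0) with h' | h'
    · rw [min_eq_left h']; exact ih (by omega)
    · rw [min_eq_right h']; exact getD_mem a _ (by omega)

lemma getD_set_self (l : List Int) (n : Nat) (v : Int) (h : n < l.length) :
    (l.set n v).getD n 0 = v := by
  simp [List.getD_eq_getElem?_getD, List.getElem?_set_self h]

lemma getD_set_ne (l : List Int) (n m : Nat) (v : Int) (h : n ≠ m) :
    (l.set n v).getD m 0 = l.getD m 0 := by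
  simp [List.getD_eq_getElem?_getD, List.getElem?_set_ne h]

-- invariant of A's first loop: after k steps the first k prefix / suffix minima are in place
lemma foldA_inv (a : List Int) (hL : 1 ≤ a.length) (k : Nat) (hk : k ≤ a.length) :
    ((PySem.List.pyRange 1 (k:Int) 1).foldl (stepA a a.length)
      ((List.replicate a.length ((10:Int)^9+1)).set 0 (a.getD 0 0),
       (List.replicate a.length ((10:Int)^9+1)).set (a.length-1) (a.getD (a.length-1) 0))).1.length = a.length ∧
    ((PySem.List.pyRange 1 (k:Int) 1).foldl (stepA a a.length)
      ((List.replicate a.length ((10:Int)^9+1)).set 0 (a.getD 0 0),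
       (List.replicate a.length ((10:Int)^9+1)).set (a.length-1) (a.getD (a.length-1) 0))).2.length = a.length ∧
    ∀ j : Nat, (j = 0 ∨ j < k) →
      ((PySem.List.pyRange 1 (k:Int) 1).foldl (stepA a a.length)
        ((List.replicate a.length ((10:Int)^9+1)).set 0 (a.getD 0 0),
         (List.replicate a.length ((10:Int)^9+1)).set (a.length-1) (a.getD (a.length-1) 0))).1.getD j 0 = pm a j ∧
      ((PySem.List.pyRange 1 (k:Int) 1).foldl (stepA a a.length)
        ((List.replicate a.length ((10:Int)^9+1)).set 0 (a.getD 0 0),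
         (List.replicate a.length ((10:Int)^9+1)).set (a.length-1) (a.getD (a.length-1) 0))).2.getD (a.length-1-j) 0 = sm a j := by
  induction k with
  | zero =>
    rw [PySem.List.pyRange_one_eq_nil (by norm_num)]
    refine ⟨by simp, by simp, ?_⟩
    intro j hj
    have : j = 0 := by omega
    subst this
    simp only [List.foldl_nil, Nat.sub_zero]
    constructor
    · rw [getD_set_self _ _ _ (by simpa using hL)]; rfl
    · rw [getD_set_self _ _ _ (by simp; omega)]; rfl
  | succ k ih =>
    rcases Nat.eq_zero_or_pos k with rfl | hk1
    · rw [show (((0:Nat)+1:Nat):Int) = (1:Int) by norm_num, PySem.List.pyRange_one_eq_nil (by norm_num)]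
      refine ⟨by simp, by simp, ?_⟩
      intro j hj
      have : j = 0 := by omega
      subst this
      simp only [List.foldl_nil, Nat.sub_zero]
      constructor
      · rw [getD_set_self _ _ _ (by simpa using hL)]; rfl
      · rw [getD_set_self _ _ _ (by simp; omega)]; rfl
    · obtain ⟨hl1, hl2, hv⟩ := ih (by omega)
      rw [show ((k+1:Nat):Int) = (k:Int)+1 by push_cast; ring,
          PySem.List.pyRange_one_succ_right (by exact_mod_cast hk1),
          List.foldl_append, List.foldl_cons, List.foldl_nil]
      set st := (PySem.List.pyRange 1 (k:Int) 1).foldl (stepA a a.length)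
        ((List.replicate a.length ((10:Int)^9+1)).set 0 (a.getD 0 0),
         (List.replicate a.length ((10:Int)^9+1)).set (a.length-1) (a.getD (a.length-1) 0)) with hst
      simp only [stepA, Int.toNat_natCast]
      refine ⟨by simp [hl1], by simp [hl2], ?_⟩
      rintro j hj
      by_cases hjk : j = k
      · subst hjk
        obtain ⟨j', rfl⟩ : ∃ j', j = j' + 1 := ⟨j - 1, by omega⟩
        constructor
        · rw [getD_set_self _ _ _ (by rw [hl1]; omega)]
          have := (hv j' (Or.inr (by omega))).1
          rw [show (j'+1:Nat)-1 = j' by omega, this]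
          rfl
        · rw [getD_set_self _ _ _ (by rw [hl2]; omega)]
          have := (hv j' (Or.inr (by omega))).2
          rw [show a.length-(j'+1) = a.length-1-j' by omega, this]
          rfl
      · have hj' : j = 0 ∨ j < k := by omega
        constructor
        · rw [getD_set_ne _ _ _ _ (by omega)]
          exact (hv j hj').1
        · rw [getD_set_ne _ _ _ _ (by omega)]
          exact (hv j hj').2


-- generic: A's counting loop is 2 plus a 0/1 indicator sum
lemma foldl_if_count (l : List Int) (p : Int → Prop) [DecidablePred p] (init : Int) :
    l.foldl (fun ans i => if p i then ans else ans + 1) init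
      = init + (l.map (fun i => if p i then (0:Int) else 1)).sum := by
  induction l generalizing init with
  | nil => simp
  | cons h t ih => simp only [List.foldl_cons, List.map_cons, List.sum_cons, ih]; split <;> ring

-- invariant of B's forward loop
lemma foldB1_inv (a : List Int) (m : Int) (k : Nat) (hk : 1 ≤ k) :
    (PySem.List.pyRange 1 (k:Int) 1).foldl (stepB1 a m) (0, 0, a.getD 0 0)
      = (((PySem.List.pyRange 1 (k:Int) 1).map
            (fun i => if a.getD i.toNat 0 ≤ pm a (i.toNat-1) then (1:Int) else 0)).sum,
         ((PySem.List.pyRange 1 (k:Int) 1).map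
            (fun i => if a.getD i.toNat 0 = m then (1:Int) else 0)).sum,
         pm a (k-1)) := by
  induction k, hk using Nat.le_induction with
  | base => simp [PySem.List.pyRange_one_eq_nil (by norm_num : (1:Int) ≤ 1), pm]
  | succ k hk ih =>
    have hcast : ((k+1:Nat):Int) = (k:Int) + 1 := by push_cast; ring
    rw [hcast, PySem.List.pyRange_one_succ_right (by exact_mod_cast hk : (1:Int) ≤ (k:Int))]
    rw [List.foldl_append, List.map_append, List.map_append, List.sum_append, List.sum_append, ih]
    obtain ⟨k', rfl⟩ : ∃ k', k = k' + 1 := ⟨k - 1, by omega⟩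
    simp only [stepB1, List.foldl_cons, List.foldl_nil, List.map_cons, List.map_nil,
      List.sum_cons, List.sum_nil, Int.toNat_natCast]
    simp only [Nat.add_sub_cancel, Prod.mk.injEq, pm]
    refine ⟨by split <;> ring, by split <;> ring, trivial⟩


-- invariant of B's backward loop
lemma foldB2_inv (a : List Int) (hL : 3 ≤ a.length) (d : Nat) (hd : d ≤ a.length - 2) :
    (PySem.List.pyRange ((a.length:Int)-2) ((a.length:Int)-2-(d:Int)) (-1)).foldl (stepB2 a)
        (0, a.getD (a.length-1) 0)
      = (((PySem.List.pyRange ((a.length:Int)-1-(d:Int)) ((a.length:Int)-1) 1).map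
            (fun i => if a.getD i.toNat 0 ≤ sm a (a.length-2-i.toNat) then (1:Int) else 0)).sum,
         sm a d) := by
  induction d with
  | zero =>
    rw [show ((a.length:Int)-2-((0:Nat):Int)) = (a.length:Int)-2 by push_cast; ring]
    rw [PySem.List.pyRange_neg_one_eq_nil (le_refl _)]
    rw [show ((a.length:Int)-1-((0:Nat):Int)) = (a.length:Int)-1 by push_cast; ring]
    rw [PySem.List.pyRange_one_eq_nil (le_refl _)]
    simp [sm]
  | succ d ih =>
    have hd' : d ≤ a.length - 2 := by omega
    have htail : (PySem.List.pyRange ((a.length:Int)-1-((d:Nat):Int)) ((a.length:Int)-1) 1).reverse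
        = PySem.List.pyRange ((a.length:Int)-2) ((a.length:Int)-2-((d:Nat):Int)) (-1) := by
      rw [PySem.List.pyRange_neg_one_eq_reverse]
      congr 2 <;> ring
    rw [PySem.List.pyRange_neg_one_eq_reverse]
    rw [show ((a.length:Int)-2-((d+1:Nat):Int)+1) = (a.length:Int)-1-((d+1:Nat):Int) by push_cast; ring]
    rw [show ((a.length:Int)-2+1) = (a.length:Int)-1 by ring]
    rw [PySem.List.pyRange_one_cons (by push_cast; omega)]
    rw [List.reverse_cons, List.foldl_append]
    rw [show ((a.length:Int)-1-((d+1:Nat):Int)+1) = (a.length:Int)-1-((d:Nat):Int) by push_cast; ring]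
    rw [htail, ih hd']
    -- now compute one step of stepB2 on the head
    have hn : ((a.length:Int)-1-((d+1:Nat):Int)).toNat = a.length - 2 - d := by push_cast; omega
    simp only [List.foldl_cons, List.foldl_nil, stepB2, hn]
    have hsm : a.length - 2 - (a.length - 2 - d) = d := by omega
    have hsm2 : sm a (d+1) = min (sm a d) (a.getD (a.length-2-d) 0) := by
      show min (sm a d) (a.getD (a.length-1-(d+1)) 0) = _
      rw [show a.length-1-(d+1) = a.length-2-d by omega]
    simp only [List.map_cons, List.sum_cons, hn, hsm, hsm2, Prod.mk.injEq]
    exact ⟨by split <;> ring, trivial⟩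


-- the two-sided weak minima are exactly the global minima
lemma both_iff (a : List Int) (j : Nat) (hj1 : 1 ≤ j) (hj2 : j ≤ a.length - 2) (hL : 3 ≤ a.length)
    (m : Int) (hm : PySem.List.min? a (fun y => y) = some m) :
    (a.getD j 0 ≤ pm a (j-1) ∧ a.getD j 0 ≤ sm a (a.length-2-j)) ↔ a.getD j 0 = m := by
  have hmin : ∀ y ∈ a, m ≤ y := PySem.List.min?_isMin hm
  have hmem : m ∈ a := PySem.List.min?_mem hm
  constructor
  · rintro ⟨h1, h2⟩
    have hxm : m ≤ a.getD j 0 := hmin _ (getD_mem a j (by omega))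
    obtain ⟨t, ht, hts⟩ := List.mem_iff_getElem.mp hmem
    have htd : a.getD t 0 = m := by rw [List.getD_eq_getElem a 0 ht, hts]
    rcases lt_trichotomy t j with h | h | h
    · have := pm_le a (j-1) t (by omega)
      omega
    · subst h; omega
    · have := sm_le a (a.length-2-j) t (by omega) ht
      omega
  · intro hx
    refine ⟨?_, ?_⟩
    · rw [hx]; exact hmin _ (pm_mem a (j-1) (by omega))
    · rw [hx]; exact hmin _ (sm_mem a (a.length-2-j) (by omega))

lemma sum_map_sub3 (l : List Int) (f g h : Int → Int) :
    (l.map (fun i => f i + g i - h i)).sum = (l.map f).sum + (l.map g).sum - (l.map h).sum := by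
  induction l with
  | nil => simp
  | cons x t ih => simp only [List.map_cons, List.sum_cons, ih]; ring

-- ===== VERDICT (by name: the statement is the Claim_ definition above) =====
theorem solution_spec : Claim_equal_solution := by
  intro a _ hpre
  unfold Spec_solution
  have hL1 : 1 ≤ a.length := List.length_pos_of_ne_nil hpre
  by_cases hle : a.length ≤ 2
  · have hnil : PySem.List.pyRange 1 ((a.length:Int)-1) 1 = [] :=
      PySem.List.pyRange_one_eq_nil (by omega)
    simp only [solution, solution_alt, hnil, List.foldl_nil]
    rw [if_pos hle]
  · have hL3 : 3 ≤ a.length := by omega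
    obtain ⟨m, hm⟩ : ∃ m, PySem.List.min? a (fun y => y) = some m := by
      cases h : PySem.List.min? a (fun y => y) with
      | none => exact absurd ((PySem.List.min?_eq_none_iff a (fun y => y)).mp h) hpre
      | some m => exact ⟨m, rfl⟩
    obtain ⟨hA1, hA2, hAv⟩ := foldA_inv a hL1 a.length le_rfl
    have hB1 := foldB1_inv a m (a.length-1) (by omega)
    rw [show (((a.length-1:Nat)):Int) = (a.length:Int)-1 by omega] at hB1
    have hB2 := foldB2_inv a hL3 (a.length-2) (by omega)
    rw [show ((a.length:Int)-2-((a.length-2:Nat):Int)) = 0 by omega,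
        show ((a.length:Int)-1-((a.length-2:Nat):Int)) = 1 by omega] at hB2
    simp only [solution, solution_alt]
    rw [if_neg (by omega), hm, Option.getD_some, hB1, hB2, foldl_if_count]
    have hpt : ∀ i ∈ PySem.List.pyRange 1 ((a.length:Int)-1) 1,
        (fun i => if ((PySem.List.pyRange 1 ((a.length:Nat):Int) 1).foldl (stepA a a.length)
              ((List.replicate a.length ((10:Int)^9+1)).set 0 (a.getD 0 0),
               (List.replicate a.length ((10:Int)^9+1)).set (a.length-1) (a.getD (a.length-1) 0))).1.getD (i.toNat-1) 0 < a.getD i.toNat 0 ∧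
            ((PySem.List.pyRange 1 ((a.length:Nat):Int) 1).foldl (stepA a a.length)
              ((List.replicate a.length ((10:Int)^9+1)).set 0 (a.getD 0 0),
               (List.replicate a.length ((10:Int)^9+1)).set (a.length-1) (a.getD (a.length-1) 0))).2.getD (i.toNat+1) 0 < a.getD i.toNat 0
          then (0:Int) else 1) i
        = (fun i => (if a.getD i.toNat 0 ≤ pm a (i.toNat-1) then (1:Int) else 0)
          + (if a.getD i.toNat 0 ≤ sm a (a.length-2-i.toNat) then (1:Int) else 0)
          - (if a.getD i.toNat 0 = m then (1:Int) else 0)) i := by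
      intro i hi
      obtain ⟨hi1, hi2⟩ := PySem.List.mem_pyRange_one.mp hi
      have hj1 : 1 ≤ i.toNat := by omega
      have hj2 : i.toNat ≤ a.length - 2 := by omega
      simp only []
      rw [(hAv (i.toNat-1) (Or.inr (by omega))).1]
      rw [show i.toNat+1 = a.length-1-(a.length-2-i.toNat) by omega]
      rw [(hAv (a.length-2-i.toNat) (Or.inr (by omega))).2]
      have hb := both_iff a i.toNat hj1 hj2 hL3 m hm
      by_cases c1 : a.getD i.toNat 0 ≤ pm a (i.toNat-1) <;>
        by_cases c2 : a.getD i.toNat 0 ≤ sm a (a.length-2-i.toNat)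
      · have hxm : a.getD i.toNat 0 = m := hb.mp ⟨c1, c2⟩
        rw [if_neg (fun h => absurd h.1 (not_lt.mpr c1)), if_pos c1, if_pos c2, if_pos hxm]; ring
      · have hxm : a.getD i.toNat 0 ≠ m := fun he => c2 (hb.mpr he).2
        rw [if_neg (fun h => absurd h.1 (not_lt.mpr c1)), if_pos c1, if_neg c2, if_neg hxm]; ring
      · have hxm : a.getD i.toNat 0 ≠ m := fun he => c1 (hb.mpr he).1
        rw [if_neg (fun h => absurd h.2 (not_lt.mpr c2)), if_neg c1, if_pos c2, if_neg hxm]; ring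
      · have hxm : a.getD i.toNat 0 ≠ m := fun he => c1 (hb.mpr he).1
        rw [if_pos ⟨not_le.mp c1, not_le.mp c2⟩, if_neg c1, if_neg c2, if_neg hxm]; ring
    rw [List.map_congr_left hpt, sum_map_sub3]
    ring

@[simp] theorem solution_raises : Claim_raises_solution := by
  unfold Claim_raises_solution
  exact ⟨fun a _ h hp => hp h, by decide⟩
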